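-- pv_equiv track=rewrite | github.com/undefineduser76/PythonAlgorithmStudy | Week2/Q3/네오.py | pick_most_common
-- ===== SOURCE A (Python) =====
-- def pick_most_common(counted):
--     most_picked = []
--
--     for comb_counts in counted.values():
--         max_count = 0
--         max_combinations = []
--
--         for k, v in comb_counts.items():
--             if v == max_count:
--                 max_combinations.append(k)
--             if v > max_count:
--                 max_combinations = [k]
--                 max_count = v
--
--         if max_count >= 2:
--             most_picked += max_combinations
--
--     return most_picked
-- ===== SOURCE B (Python) =====
-- def pick_most_common(counted):
--     most_picked = []
--     for comb_counts in counted.values():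
--         if not comb_counts:
--             continue
--         m = max(comb_counts.values())
--         if m >= 2:
--             most_picked.extend(k for k, v in comb_counts.items() if v == m)
--     return most_picked
-- ===== Notes on version B (the rewrite author's own statement) =====
-- stated objective: idiomatic
-- what changed: Replaces A's online running-max-with-reset scan (which rebuilds the candidate list on every new maximum) by a plain max() pass followed by an order-preserving filter of the keys whose count equals that maximum.
import Mathlib
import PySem

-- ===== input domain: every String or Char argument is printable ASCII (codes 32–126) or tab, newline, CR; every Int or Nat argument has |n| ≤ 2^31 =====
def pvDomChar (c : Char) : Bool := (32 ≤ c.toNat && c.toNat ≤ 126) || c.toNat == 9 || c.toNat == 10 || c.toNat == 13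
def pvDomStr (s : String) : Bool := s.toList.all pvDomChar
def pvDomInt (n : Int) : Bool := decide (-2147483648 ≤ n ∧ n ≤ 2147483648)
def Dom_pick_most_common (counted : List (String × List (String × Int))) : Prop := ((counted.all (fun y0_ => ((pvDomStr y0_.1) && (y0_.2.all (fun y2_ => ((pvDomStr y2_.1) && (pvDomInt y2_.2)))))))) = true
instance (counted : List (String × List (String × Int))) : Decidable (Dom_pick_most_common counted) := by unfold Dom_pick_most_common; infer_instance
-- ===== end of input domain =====

-- B replaces A's online running-max-with-reset scan by a max pass plus an order-preserving filter (idiomatic, same cost).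

-- ===== PORT A =====
-- inner loop of A: running (max_count, max_combinations) over one group's items
def pvStepA (st : Int × List String) (kv : String × Int) : Int × List String :=
  let mc := if kv.2 == st.1 then st.2 ++ [kv.1] else st.2
  if kv.2 > st.1 then (kv.2, [kv.1]) else (st.1, mc)

def pick_most_common (counted : List (String × List (String × Int))) : List String :=
  counted.foldl (fun acc g =>
    let r := g.2.foldl pvStepA (0, [])
    if r.1 ≥ 2 then acc ++ r.2 else acc) []

-- ===== PORT B =====
def pick_most_common_alt (counted : List (String × List (String × Int))) : List String :=
  counted.foldl (fun acc g =>
    match PySem.List.max? (g.2.map Prod.snd) (fun x : Int => x) with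
    | none => acc                 -- empty group: skipped ("if not comb_counts: continue")
    | some m =>
      if m ≥ 2 then acc ++ (g.2.filter (fun kv => kv.2 == m)).map Prod.fst
      else acc) []

-- ===== PRECONDITION & SPEC =====
def Spec_pick_most_common (counted : List (String × List (String × Int))) (out : List String) : Prop := out = pick_most_common_alt counted
instance (counted : List (String × List (String × Int))) (out : List String) : Decidable (Spec_pick_most_common counted out) := by unfold Spec_pick_most_common; infer_instance

-- ===== CLAIM (what is proved, stated in full; the proofs are below) =====
def Claim_equal_pick_most_common : Prop := ∀ (counted : List (String × List (String × Int))), Dom_pick_most_common counted → Spec_pick_most_common counted (pick_most_common counted)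

-- ===== LEMMAS AND PROOFS =====

-- the running max in A's inner loop is a fold of `max`
lemma stepA_fst (l : List (String × Int)) : ∀ (m : Int) (c : List String),
    (l.foldl pvStepA (m, c)).1 = l.foldl (fun a kv => max a kv.2) m := by
  induction l with
  | nil => intro m c; rfl
  | cons h t ih =>
    intro m c
    simp only [List.foldl_cons, pvStepA]
    by_cases hv : h.2 > m
    · simp only [if_pos hv, ih]
      congr 1; omega
    · simp only [if_neg hv, ih]
      congr 1; omega

lemma foldl_max_comm (l : List Int) : ∀ (a b : Int),
    l.foldl max (max a b) = max a (l.foldl max b) := by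
  induction l with
  | nil => intro a b; rfl
  | cons h t ih =>
    intro a b
    simp only [List.foldl_cons]
    rw [max_assoc, ih]

lemma stepA_fst_ge (l : List (String × Int)) (m : Int) (c : List String) :
    m ≤ (l.foldl pvStepA (m, c)).1 := by
  rw [stepA_fst]
  induction l generalizing m with
  | nil => simp
  | cons h t ih =>
    simp only [List.foldl_cons]
    exact le_trans (le_max_left _ _) (ih (max m h.2))

-- A's collected list: the keys whose count equals the final maximum (plus the carried
-- accumulator when no reset ever happened)
lemma stepA_snd (l : List (String × Int)) : ∀ (m : Int) (c : List String),
    (l.foldl pvStepA (m, c)).2 =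
      (if (l.foldl pvStepA (m, c)).1 = m then c else []) ++
        (l.filter (fun kv => kv.2 == (l.foldl pvStepA (m, c)).1)).map Prod.fst := by
  induction l with
  | nil => intro m c; simp
  | cons h t ih =>
    intro m c
    simp only [List.foldl_cons, pvStepA]
    by_cases hv : h.2 > m
    · simp only [if_pos hv]
      rw [ih h.2 [h.1]]
      have hge1 : h.2 ≤ (t.foldl pvStepA (h.2, [h.1])).1 := stepA_fst_ge t h.2 [h.1]
      have hmne : ¬ (t.foldl pvStepA (h.2, [h.1])).1 = m := by omega
      rw [if_neg hmne]
      by_cases hEq : (t.foldl pvStepA (h.2, [h.1])).1 = h.2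
      · have hb : (h.2 == (t.foldl pvStepA (h.2, [h.1])).1) = true := by
          simp [hEq]
        simp [List.filter_cons, hb, hEq]
      · have hb : (h.2 == (t.foldl pvStepA (h.2, [h.1])).1) = false := by
          simp; intro hc; exact hEq hc.symm
        simp [List.filter_cons, hb, hEq]
    · simp only [if_neg hv]
      by_cases hvm : (h.2 == m) = true
      · have hm : h.2 = m := by simpa using hvm
        simp only [if_pos hvm]
        rw [ih m (c ++ [h.1])]
        have hge1 : m ≤ (t.foldl pvStepA (m, c ++ [h.1])).1 := stepA_fst_ge t m _
        by_cases hEq : (t.foldl pvStepA (m, c ++ [h.1])).1 = m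
        · have hb : (h.2 == (t.foldl pvStepA (m, c ++ [h.1])).1) = true := by
            simp at hvm ⊢; omega
          simp [List.filter_cons, hb, hEq, hm]
        · have hb : (h.2 == (t.foldl pvStepA (m, c ++ [h.1])).1) = false := by
            simp at hvm ⊢; omega
          simp [List.filter_cons, hb, hEq]
      · have hm : ¬ h.2 = m := by simpa using hvm
        simp only [if_neg hvm]
        rw [ih m c]
        have hge1 : m ≤ (t.foldl pvStepA (m, c)).1 := stepA_fst_ge t m _
        by_cases hEq : (t.foldl pvStepA (m, c)).1 = m
        · have hb : (h.2 == (t.foldl pvStepA (m, c)).1) = false := by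
            simp at hvm ⊢; omega
          simp [List.filter_cons, hb, hEq, hm]
        · have hlt : m < (t.foldl pvStepA (m, c)).1 := lt_of_le_of_ne hge1 (Ne.symm hEq)
          have hb : (h.2 == (t.foldl pvStepA (m, c)).1) = false := by
            simp at hv ⊢; omega
          simp [List.filter_cons, hb, hEq]

-- per-group agreement of the two fold bodies
lemma group_agree (acc : List String) (l : List (String × Int)) :
    (let r := l.foldl pvStepA (0, []);
      if r.1 ≥ 2 then acc ++ r.2 else acc) =
    (match PySem.List.max? (l.map Prod.snd) (fun x : Int => x) with
      | none => acc
      | some m =>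
        if m ≥ 2 then acc ++ (l.filter (fun kv => kv.2 == m)).map Prod.fst
        else acc) := by
  cases l with
  | nil => simp [PySem.List.max?]
  | cons h t =>
    have hmax : PySem.List.max? ((h :: t).map Prod.snd) (fun x : Int => x) =
        some ((t.map Prod.snd).foldl max h.2) := by
      simp only [List.map_cons]
      exact PySem.List.max?_id_cons h.2 (t.map Prod.snd)
    have hfst : ((h :: t).foldl pvStepA (0, [])).1 =
        max 0 ((t.map Prod.snd).foldl max h.2) := by
      rw [stepA_fst]
      simp only [List.foldl_cons]
      have hmap : ∀ (s : Int), (t.map Prod.snd).foldl max s =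
          t.foldl (fun a kv => max a kv.2) s := fun s => List.foldl_map
      rw [← hmap]
      exact foldl_max_comm _ 0 h.2
    rw [hmax]
    show (if ((h :: t).foldl pvStepA (0, [])).1 ≥ 2
            then acc ++ ((h :: t).foldl pvStepA (0, [])).2 else acc) =
         (if (t.map Prod.snd).foldl max h.2 ≥ 2
            then acc ++ ((h :: t).filter
              (fun kv => kv.2 == (t.map Prod.snd).foldl max h.2)).map Prod.fst
            else acc)
    by_cases h2 : (t.map Prod.snd).foldl max h.2 ≥ 2
    · have hM : ((h :: t).foldl pvStepA (0, [])).1 = (t.map Prod.snd).foldl max h.2 := by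
        rw [hfst]; omega
      have hA2 : ((h :: t).foldl pvStepA (0, [])).1 ≥ 2 := by omega
      have hsnd := stepA_snd (h :: t) 0 []
      rw [hM] at hsnd
      rw [if_neg (by omega : ¬ ((t.map Prod.snd).foldl max h.2 = (0:Int))),
        List.nil_append] at hsnd
      rw [if_pos hA2, if_pos h2, hsnd]
    · have hA : ¬ ((h :: t).foldl pvStepA (0, [])).1 ≥ 2 := by rw [hfst]; omega
      rw [if_neg hA, if_neg h2]

lemma folds_agree (counted : List (String × List (String × Int))) : ∀ (acc : List String),
    counted.foldl (fun acc g =>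
      let r := g.2.foldl pvStepA (0, [])
      if r.1 ≥ 2 then acc ++ r.2 else acc) acc =
    counted.foldl (fun acc g =>
      match PySem.List.max? (g.2.map Prod.snd) (fun x : Int => x) with
      | none => acc
      | some m =>
        if m ≥ 2 then acc ++ (g.2.filter (fun kv => kv.2 == m)).map Prod.fst
        else acc) acc := by
  induction counted with
  | nil => intro acc; rfl
  | cons g t ih =>
    intro acc
    simp only [List.foldl_cons]
    rw [group_agree acc g.2, ih]

-- ===== VERDICT (by name: the statement is the Claim_ definition above) =====
theorem pick_most_common_spec : Claim_equal_pick_most_common := by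
  intro counted _
  unfold Spec_pick_most_common pick_most_common pick_most_common_alt
  exact folds_agree counted []
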